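-- pv_equiv track=rewrite | github.com/yukunfeng/fairseq | examples/translation/make_context_dataset/make_context_nmt_dataset.py | align_src_side
-- ===== SOURCE A (Python) =====
-- def align_src_side(src_lines, tgt_lines, previous_n, seg_symbol):
--   output = []
--   i = 0
--   for i in range(len(src_lines)):
--     src_line = src_lines[i]
--     tgt_line = tgt_lines[i]
--     new_src_line = src_line
--     for k in range(1, previous_n + 1):
--       if i - k < 0:
--         continue
--       new_src_line = f"{src_lines[i - k]} {seg_symbol} {new_src_line}"
--     output.append((new_src_line, tgt_line))
--   return output
-- ===== SOURCE B (Python) =====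
-- def align_src_side(src_lines, tgt_lines, previous_n, seg_symbol):
--     keep = (previous_n if previous_n > 0 else 0) + 1
--     sep = f" {seg_symbol} "
--     window = []
--     output = []
--     for i in range(len(src_lines)):
--         window.append(src_lines[i])
--         if len(window) > keep:
--             window.pop(0)
--         output.append((sep.join(window), tgt_lines[i]))
--     return output
-- ===== Notes on version B (the rewrite author's own statement) =====
-- stated objective: alternative
-- what changed: B maintains a sliding window of the last previous_n+1 source lines incrementally (append + pop-front) and joins it once per row, instead of A's per-row backwards inner loop that rebuilds the context string by repeated prepends.
import Mathlib
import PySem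

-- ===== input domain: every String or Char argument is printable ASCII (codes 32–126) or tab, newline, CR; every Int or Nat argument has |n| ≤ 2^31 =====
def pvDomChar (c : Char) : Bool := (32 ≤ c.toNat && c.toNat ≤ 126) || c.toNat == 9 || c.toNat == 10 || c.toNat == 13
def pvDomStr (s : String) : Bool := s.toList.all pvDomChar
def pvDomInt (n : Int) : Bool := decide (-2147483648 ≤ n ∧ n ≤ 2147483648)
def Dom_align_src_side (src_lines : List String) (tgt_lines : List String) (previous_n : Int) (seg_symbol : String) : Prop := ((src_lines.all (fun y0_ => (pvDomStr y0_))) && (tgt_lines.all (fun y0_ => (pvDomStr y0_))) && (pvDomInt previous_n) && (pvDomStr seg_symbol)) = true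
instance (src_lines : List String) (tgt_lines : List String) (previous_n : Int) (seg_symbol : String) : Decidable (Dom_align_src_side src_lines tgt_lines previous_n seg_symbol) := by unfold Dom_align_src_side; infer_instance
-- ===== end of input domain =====

-- B replaces A's per-row backwards prepend loop by an incrementally maintained sliding window
-- of the last previous_n+1 source lines joined once per row (objective: alternative).

-- ===== PORT A =====
def align_src_side (src_lines : List String) (tgt_lines : List String) (previous_n : Int) (seg_symbol : String) : List (String × String) :=
  (PySem.List.pyRange 0 (src_lines.length : Int) 1).foldl
    (fun output i =>
      let src_line := PySem.List.pyGetD src_lines i ""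
      let tgt_line := PySem.List.pyGetD tgt_lines i ""   -- exact under Pre_ (i < len tgt_lines)
      let new_src_line :=
        (PySem.List.pyRange 1 (previous_n + 1) 1).foldl
          (fun acc k =>
            if i - k < 0 then acc
            else PySem.List.pyGetD src_lines (i - k) "" ++ " " ++ seg_symbol ++ " " ++ acc)
          src_line
      output ++ [(new_src_line, tgt_line)])
    []

-- ===== PORT B =====
def align_src_side_alt (src_lines : List String) (tgt_lines : List String) (previous_n : Int) (seg_symbol : String) : List (String × String) :=
  let keep : Int := (if previous_n > 0 then previous_n else 0) + 1
  let sep : String := " " ++ seg_symbol ++ " "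
  ((PySem.List.pyRange 0 (src_lines.length : Int) 1).foldl
    (fun (st : List String × List (String × String)) i =>
      let w := st.1 ++ [PySem.List.pyGetD src_lines i ""]
      let w' := if keep < (w.length : Int) then
          (match PySem.List.pop? w 0 with
           | some (_, rest) => rest
           | none => w)
        else w
      (w', st.2 ++ [(PySem.Str.join sep w', PySem.List.pyGetD tgt_lines i "")]))   -- tgt index exact under Pre_
    ([], [])).2

-- ===== PRECONDITION & SPEC =====
-- Pre_ excludes inputs where tgt_lines is shorter than src_lines: there both Pythons raise IndexError on tgt_lines[i].
def Pre_align_src_side (src_lines : List String) (tgt_lines : List String) (previous_n : Int) (seg_symbol : String) : Prop :=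
  src_lines.length ≤ tgt_lines.length
instance (src_lines : List String) (tgt_lines : List String) (previous_n : Int) (seg_symbol : String) : Decidable (Pre_align_src_side src_lines tgt_lines previous_n seg_symbol) := by unfold Pre_align_src_side; infer_instance

def pvWitness_align_src_side : List String × List String × Int × String := (["a", "b"], ["x", "y"], 1, "<s>")

def Spec_align_src_side (src_lines : List String) (tgt_lines : List String) (previous_n : Int) (seg_symbol : String) (out : List (String × String)) : Prop := out = align_src_side_alt src_lines tgt_lines previous_n seg_symbol
instance (src_lines : List String) (tgt_lines : List String) (previous_n : Int) (seg_symbol : String) (out : List (String × String)) : Decidable (Spec_align_src_side src_lines tgt_lines previous_n seg_symbol out) := by unfold Spec_align_src_side; infer_instance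

-- ===== CLAIM (what is proved, stated in full; the proofs are below) =====
def Claim_equal_align_src_side : Prop := ∀ (src_lines : List String) (tgt_lines : List String) (previous_n : Int) (seg_symbol : String), Dom_align_src_side src_lines tgt_lines previous_n seg_symbol → Pre_align_src_side src_lines tgt_lines previous_n seg_symbol → Spec_align_src_side src_lines tgt_lines previous_n seg_symbol (align_src_side src_lines tgt_lines previous_n seg_symbol)

-- ===== LEMMAS AND PROOFS =====

-- join over a one-element list
theorem pvJoin_singleton (sep x : String) : PySem.Str.join sep [x] = x := by
  apply String.toList_inj.mp
  simp [PySem.Str.toList_join, PySem.Chars.join_singleton]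

-- join over a list with ≥ 2 elements, with the separator " seg " in A's left-associated shape
theorem pvJoin_cc (seg p q : String) (rest : List String) :
    PySem.Str.join (" " ++ seg ++ " ") (p :: q :: rest)
      = p ++ " " ++ seg ++ " " ++ PySem.Str.join (" " ++ seg ++ " ") (q :: rest) := by
  apply String.toList_inj.mp
  simp [PySem.Str.toList_join, PySem.Chars.join_cons_cons]

-- A's inner loop over range(1, m+1) builds the join of the window src[i-m..i]
theorem pvRowA_eq (src : List String) (seg : String) (m i : Nat) (hi : i < src.length) :
    (PySem.List.pyRange 1 ((m : Int) + 1) 1).foldl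
      (fun acc k =>
        if (i : Int) - k < 0 then acc
        else PySem.List.pyGetD src ((i : Int) - k) "" ++ " " ++ seg ++ " " ++ acc)
      (PySem.List.pyGetD src (i : Int) "")
    = PySem.Str.join (" " ++ seg ++ " ") ((src.take (i + 1)).drop (i - m)) := by
  induction m with
  | zero =>
    rw [show ((0 : Nat) : Int) + 1 = 1 by norm_num, PySem.List.pyRange_one_eq_nil le_rfl]
    simp only [List.foldl_nil, Nat.sub_zero]
    have h1 : (src.take (i + 1)).drop i = [src[i]] := by
      rw [List.drop_take, show i + 1 - i = 1 from by omega, List.take_one,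
          List.head?_drop, List.getElem?_eq_getElem hi]
      rfl
    rw [h1, pvJoin_singleton, PySem.List.pyGetD_natCast, List.getD_eq_getElem?_getD]
    simp [hi]
  | succ m ih =>
    rw [show ((m + 1 : Nat) : Int) + 1 = ((m : Int) + 1) + 1 by push_cast; ring,
        PySem.List.pyRange_one_succ_right (by omega), List.foldl_append]
    simp only [List.foldl_cons, List.foldl_nil]
    rw [ih]
    by_cases hcase : i ≤ m
    · rw [if_pos (by omega : (i : Int) - ((m : Int) + 1) < 0)]
      have : i - (m + 1) = i - m := by omega
      rw [this]
    · push_neg at hcase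
      rw [if_neg (by omega : ¬ (i : Int) - ((m : Int) + 1) < 0)]
      have hidx : (i : Int) - ((m : Int) + 1) = ((i - (m + 1) : Nat) : Int) := by omega
      rw [hidx, PySem.List.pyGetD_natCast]
      have hl1 : i - (m + 1) < (src.take (i + 1)).length := by
        simp [List.length_take]; omega
      have hl2 : i - m < (src.take (i + 1)).length := by
        simp [List.length_take]; omega
      rw [List.drop_eq_getElem_cons hl1]
      have hstep : i - (m + 1) + 1 = i - m := by omega
      rw [hstep, List.drop_eq_getElem_cons hl2, pvJoin_cc, ← List.drop_eq_getElem_cons hl2]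
      have hlt : i - (m + 1) < src.length := by omega
      have hget : (src.take (i + 1))[i - (m + 1)]'hl1 = src.getD (i - (m + 1)) "" := by
        simp [List.getElem_take, List.getD_eq_getElem?_getD, List.getElem?_eq_getElem hlt]
      rw [hget]

-- the inner range(1, previous_n + 1) equals range(1, toNat previous_n + 1)
theorem pvRangeFix (p : Int) :
    PySem.List.pyRange 1 (p + 1) 1 = PySem.List.pyRange 1 ((p.toNat : Int) + 1) 1 := by
  by_cases h : 0 ≤ p
  · rw [Int.toNat_of_nonneg h]
  · rw [PySem.List.pyRange_one_eq_nil (by omega), PySem.List.pyRange_one_eq_nil (by omega)]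

-- A as a map over indices
theorem pvA_eq_map (src tgt : List String) (p : Int) (seg : String) :
    align_src_side src tgt p seg
      = (List.range src.length).map
          (fun i => (PySem.Str.join (" " ++ seg ++ " ") ((src.take (i + 1)).drop (i - p.toNat)),
                     tgt.getD i "")) := by
  unfold align_src_side
  rw [PySem.List.pyRange_zero_nat, List.foldl_map]
  rw [PySem.List.foldl_append_singleton_eq_map
        (f := fun (i : Nat) =>
          ((PySem.List.pyRange 1 (p + 1) 1).foldl
            (fun acc k =>
              if (i : Int) - k < 0 then acc
              else PySem.List.pyGetD src ((i : Int) - k) "" ++ " " ++ seg ++ " " ++ acc)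
            (PySem.List.pyGetD src (i : Int) ""),
           PySem.List.pyGetD tgt (i : Int) ""))]
  rw [List.nil_append]
  apply List.map_congr_left
  intro i hi
  rw [List.mem_range] at hi
  rw [pvRangeFix, pvRowA_eq src seg p.toNat i hi, PySem.List.pyGetD_natCast]

-- B's loop invariant: window = last (m+1) of the first n lines, output = the mapped rows
theorem pvB_loop (src tgt : List String) (sep : String) (m : Nat) (n : Nat) (hn : n ≤ src.length) :
    (List.range n).foldl
      (fun (st : List String × List (String × String)) (i : Nat) =>
        let w := st.1 ++ [PySem.List.pyGetD src (i : Int) ""]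
        let w' := if ((m : Int) + 1) < (w.length : Int) then
            (match PySem.List.pop? w 0 with
             | some (_, rest) => rest
             | none => w)
          else w
        (w', st.2 ++ [(PySem.Str.join sep w', PySem.List.pyGetD tgt (i : Int) "")]))
      ([], [])
    = ((src.take n).drop (n - (m + 1)),
       (List.range n).map
         (fun i => (PySem.Str.join sep ((src.take (i + 1)).drop (i - m)), tgt.getD i ""))) := by
  induction n with
  | zero => simp
  | succ n ih =>
    have hn' : n < src.length := by omega
    rw [List.range_succ, List.foldl_append, ih (by omega), List.foldl_cons, List.foldl_nil]
    have htake : src.take (n + 1) = src.take n ++ [src[n]] := by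
      rw [List.take_succ]
      simp [hn']
    have hw : (src.take n).drop (n - (m + 1)) ++ [PySem.List.pyGetD src (n : Int) ""]
        = (src.take (n + 1)).drop (n - (m + 1)) := by
      rw [htake, List.drop_append_of_le_length (by simp [List.length_take]; omega),
          PySem.List.pyGetD_natCast, List.getD_eq_getElem?_getD]
      simp [hn']
    have hlen : ((src.take (n + 1)).drop (n - (m + 1))).length = n + 1 - (n - (m + 1)) := by
      simp [List.length_take]; omega
    simp only [hw]
    by_cases hc : n ≤ m
    · have hiff : ¬ ((m : Int) + 1 < (((src.take (n + 1)).drop (n - (m + 1))).length : Int)) := by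
        rw [hlen]; omega
      rw [if_neg hiff]
      have h0 : n - (m + 1) = 0 := by omega
      have h1 : n + 1 - (m + 1) = 0 := by omega
      have h2 : n - m = 0 := by omega
      rw [h0, h1]
      simp [h2, hn', List.getD_eq_getElem?_getD]
    · push_neg at hc
      have hiff : (m : Int) + 1 < (((src.take (n + 1)).drop (n - (m + 1))).length : Int) := by
        rw [hlen]; omega
      rw [if_pos hiff]
      have hne : (src.take (n + 1)).drop (n - (m + 1)) ≠ [] := by
        intro h; rw [h] at hlen; simp at hlen; omega
      obtain ⟨a, rest, hcons⟩ := List.exists_cons_of_ne_nil hne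
      rw [hcons, PySem.List.pop?_zero_cons]
      have hrest : rest = (src.take (n + 1)).drop (n + 1 - (m + 1)) := by
        have : ((src.take (n + 1)).drop (n - (m + 1))).tail
            = (src.take (n + 1)).drop (n - (m + 1) + 1) := by
          rw [List.tail_drop]
        rw [hcons] at this
        simp only [List.tail_cons] at this
        rw [this]
        congr 1
        omega
      have h3 : n + 1 - (m + 1) = n - m := by omega
      rw [hrest]
      simp [h3, hn', List.getD_eq_getElem?_getD]

-- keep = previous_n clamped at 0, plus 1
theorem pvKeep (p : Int) : (if p > 0 then p else 0) + 1 = (p.toNat : Int) + 1 := by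
  split <;> omega

-- ===== VERDICT (by name: the statement is the Claim_ definition above) =====
theorem align_src_side_spec : Claim_equal_align_src_side := by
  intro src tgt p seg _ _
  unfold Spec_align_src_side
  rw [pvA_eq_map]
  show _ = align_src_side_alt src tgt p seg
  simp only [align_src_side_alt]
  rw [pvKeep, PySem.List.pyRange_zero_nat]
  simp only [List.foldl_map]
  rw [pvB_loop src tgt (" " ++ seg ++ " ") p.toNat src.length le_rfl]
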